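-- pv_equiv track=rewrite | github.com/pypi-data/pypi-mirror-150 | packages/jaccard-precalc/jaccard_precalc-0.1.3-py3-none-any.whl/jaccard_precalc/JaccardPrecalc.py | transform_to_dict
-- ===== SOURCE A (Python) =====
-- def transform_to_dict(word):
--     elements = {}
--     for start in range(len(word)):
--         for end in range(start+1, len(word)+1):
--             try:
--                 elements[word[start:end]] += 1
--             except:
--                 elements[word[start:end]] = 1
--     return elements
-- ===== SOURCE B (Python) =====
-- def transform_to_dict(word):
--     # phase 1: enumerate every substring (with multiplicity) as the prefixes
--     # of successive suffixes, built incrementally instead of by slicing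
--     subs = []
--     suffix = word
--     while suffix:
--         prefix = ''
--         for ch in suffix:
--             prefix += ch
--             subs.append(prefix)
--         suffix = suffix[1:]
--     # phase 2: one counting pass over the collected substrings
--     counts = {}
--     for s in subs:
--         counts[s] = counts.get(s, 0) + 1
--     return counts
-- ===== Notes on version B (the rewrite author's own statement) =====
-- stated objective: alternative
-- what changed: Replaces the nested index loops with per-pair slicing by a two-phase algorithm: first enumerate all substrings as incrementally grown prefixes of successive suffixes, then count them in one dict pass with get(s,0)+1 instead of try/except.
import Mathlib
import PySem

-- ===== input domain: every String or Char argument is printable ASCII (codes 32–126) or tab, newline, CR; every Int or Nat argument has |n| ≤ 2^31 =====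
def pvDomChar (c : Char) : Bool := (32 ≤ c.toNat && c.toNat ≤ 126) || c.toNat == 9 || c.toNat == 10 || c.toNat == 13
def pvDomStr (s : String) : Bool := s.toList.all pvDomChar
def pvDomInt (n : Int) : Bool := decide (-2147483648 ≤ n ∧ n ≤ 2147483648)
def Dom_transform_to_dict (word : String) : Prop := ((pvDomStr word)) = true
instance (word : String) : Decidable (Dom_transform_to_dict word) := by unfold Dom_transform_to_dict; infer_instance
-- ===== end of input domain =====

-- B enumerates all substrings as incrementally grown prefixes of successive suffixes and then counts
-- them in one dict pass, instead of A's nested index loops slicing word[start:end] per pair (alternative decomposition, same cost).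

-- ===== PORT A =====
def transform_to_dict (word : String) : List (String × Int) :=
  ((PySem.List.pyRange 0 (PySem.Str.len word) 1).foldl (fun elements start =>
      (PySem.List.pyRange (start + 1) (PySem.Str.len word + 1) 1).foldl (fun elements e =>
        match elements.get? (PySem.Str.slice word (some start) (some e)) with
        | some v => elements.insert (PySem.Str.slice word (some start) (some e)) (v + 1)
        | none => elements.insert (PySem.Str.slice word (some start) (some e)) 1) elements)
    (PySem.Dict.empty : PySem.Dict String Int)).items

-- ===== PORT B =====
-- inner 'for ch in suffix' loop of Source B: grows prefix and appends it to subs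
def pvPrefixLoop (suffix : List Char) (subs : List String) : List Char × List String :=
  suffix.foldl (fun st ch => (st.1 ++ [ch], st.2 ++ [String.ofList (st.1 ++ [ch])])) ([], subs)

-- the 'while suffix:' loop of Source B; suffix = suffix[1:] is structural recursion on the char list
def pvGenSubs : List Char → List String → List String
  | [], subs => subs
  | c :: rest, subs => pvGenSubs rest (pvPrefixLoop (c :: rest) subs).2

def transform_to_dict_alt (word : String) : List (String × Int) :=
  ((pvGenSubs word.toList []).foldl
      (fun counts s => counts.insert s (counts.getD s 0 + 1))
      (PySem.Dict.empty : PySem.Dict String Int)).items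

-- ===== PRECONDITION & SPEC =====
def Spec_transform_to_dict (word : String) (out : List (String × Int)) : Prop := out = transform_to_dict_alt word
instance (word : String) (out : List (String × Int)) : Decidable (Spec_transform_to_dict word out) := by unfold Spec_transform_to_dict; infer_instance

-- ===== CLAIM (what is proved, stated in full; the proofs are below) =====
def Claim_equal_transform_to_dict : Prop := ∀ (word : String), Dom_transform_to_dict word → Spec_transform_to_dict word (transform_to_dict word)

-- ===== LEMMAS AND PROOFS =====

-- the counting step: A's try/except increment equals B's get(s, 0) + 1 insert
lemma step_eq (d : PySem.Dict String Int) (s : String) :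
    (match d.get? s with
     | some v => d.insert s (v + 1)
     | none => d.insert s 1) = d.insert s (d.getD s 0 + 1) := by
  simp [PySem.Dict.getD]
  cases d.get? s <;> simp

-- all substrings of l, in A's (and B's) visit order (proof-only helper)
def allSubs : List Char → List String
  | [] => []
  | c :: t => (List.range (t.length + 1)).map (fun k => String.ofList ((c :: t).take (k + 1))) ++ allSubs t

lemma prefixLoop_eq (suffix : List Char) : ∀ (p : List Char) (acc : List String),
    suffix.foldl (fun st ch => (st.1 ++ [ch], st.2 ++ [String.ofList (st.1 ++ [ch])])) (p, acc)
      = (p ++ suffix, acc ++ (List.range suffix.length).map (fun k => String.ofList (p ++ suffix.take (k + 1)))) := by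
  induction suffix with
  | nil => intro p acc; simp
  | cons c t ih =>
    intro p acc
    simp only [List.foldl_cons, ih (p ++ [c]) (acc ++ [String.ofList (p ++ [c])])]
    simp [List.range_succ_eq_map, List.map_map, Function.comp, List.append_assoc]

lemma genSubs_eq (l : List Char) : ∀ (acc : List String), pvGenSubs l acc = acc ++ allSubs l := by
  induction l with
  | nil => intro acc; simp [pvGenSubs, allSubs]
  | cons c t ih =>
    intro acc
    show pvGenSubs t (pvPrefixLoop (c :: t) acc).2 = _
    rw [pvPrefixLoop, prefixLoop_eq, ih]
    simp [allSubs]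

lemma allSubs_flat (l : List Char) :
    allSubs l = (List.range l.length).flatMap
      (fun s => (List.range (l.length - s)).map (fun j => String.ofList ((l.drop s).take (j + 1)))) := by
  induction l with
  | nil => simp [allSubs]
  | cons c t ih =>
    rw [allSubs, ih, List.length_cons]
    conv_rhs => rw [List.range_succ_eq_map, List.flatMap_cons, List.flatMap_map]
    congr 1
    refine List.flatMap_congr (fun s _ => ?_)
    simp [Nat.succ_sub_succ]

-- A's slice enumeration, reindexed to the suffix/prefix form of allSubs
lemma alist_eq (cs : List Char) :
    (PySem.List.pyRange 0 (cs.length : Int) 1).flatMap (fun start =>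
        (PySem.List.pyRange (start + 1) ((cs.length : Int) + 1) 1).map (fun e =>
          String.ofList (PySem.List.slice cs (some start) (some e))))
      = (List.range cs.length).flatMap
          (fun s => (List.range (cs.length - s)).map (fun j => String.ofList ((cs.drop s).take (j + 1)))) := by
  rw [PySem.List.pyRange_one, List.flatMap_map]
  have hn : ((cs.length : Int) - 0).toNat = cs.length := by omega
  rw [hn]
  refine List.flatMap_congr (fun k hk => ?_)
  rw [PySem.List.pyRange_one, List.map_map]
  have hm : (((cs.length : Int) + 1) - (0 + (k : Int) + 1)).toNat = cs.length - k := by omega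
  rw [hm]
  refine List.map_congr_left (fun j hj => ?_)
  have h1 : ((k : Int) + 1 + (j : Int)) = ((k + 1 + j : Nat) : Int) := by push_cast; ring
  have h0 : (0 + (k : Int)) = ((k : Nat) : Int) := by omega
  simp only [Function.comp]
  rw [h0, h1, PySem.List.slice_natCast]
  have : k + 1 + j - k = j + 1 := by omega
  rw [this]

theorem transform_to_dict_eq (word : String) : transform_to_dict word = transform_to_dict_alt word := by
  unfold transform_to_dict transform_to_dict_alt
  congr 1
  rw [genSubs_eq, allSubs_flat, List.nil_append]
  have hsl : ∀ a b : Int, PySem.Str.slice word (some a) (some b)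
      = String.ofList (PySem.List.slice word.toList (some a) (some b)) := by
    intro a b
    rw [← String.ofList_toList (s := PySem.Str.slice word (some a) (some b)),
      PySem.Str.toList_slice, PySem.Chars.slice_eq_listSlice]
  simp only [step_eq, hsl, PySem.Str.len_eq]
  rw [← alist_eq word.toList, List.foldl_flatMap]
  refine PySem.List.foldl_congr_mem _ _ _ _ (fun acc x _ => ?_)
  rw [List.foldl_map]

-- ===== VERDICT (by name: the statement is the Claim_ definition above) =====
theorem transform_to_dict_spec : Claim_equal_transform_to_dict := by
  intro word _
  exact transform_to_dict_eq word
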